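-- pv_equiv track=rewrite | github.com/PetrPrazak/AdventOfCode | 2020/24/aoc2020_24.py | gridwalk
-- ===== SOURCE A (Python) =====
-- def gridwalk(steps):
--     x, y, z = 0, 0, 0
--     for s in steps:
--         if s == 'e' or s == 'w':
--             inc = 1 if s == 'w' else -1
--             x -= inc
--             y += inc
--         elif s == 'ne' or s == 'sw':
--             inc = 1 if s == 'ne' else -1
--             x += inc
--             z -= inc
--         elif s == 'se' or s == 'nw':
--             inc = 1 if s == 'se' else -1
--             y -= inc
--             z += inc
--     return x, y, z
-- ===== SOURCE B (Python) =====
-- def gridwalk(steps):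
--     # stage 1: tally how many of each of the six directions occur
--     e, w = steps.count('e'), steps.count('w')
--     ne, sw = steps.count('ne'), steps.count('sw')
--     se, nw = steps.count('se'), steps.count('nw')
--     # stage 2: closed-form cube coordinates from the tallies
--     return (e - w + ne - sw, w - e + nw - se, sw - ne + se - nw)
-- ===== Notes on version B (the rewrite author's own statement) =====
-- stated objective: alternative
-- what changed: Replaces the per-step accumulation loop by two stages: count the occurrences of each of the six direction tokens, then compute the final cube coordinates as a closed-form linear combination of the six counts (correct because the walk is commutative addition of deltas).
import Mathlib
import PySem

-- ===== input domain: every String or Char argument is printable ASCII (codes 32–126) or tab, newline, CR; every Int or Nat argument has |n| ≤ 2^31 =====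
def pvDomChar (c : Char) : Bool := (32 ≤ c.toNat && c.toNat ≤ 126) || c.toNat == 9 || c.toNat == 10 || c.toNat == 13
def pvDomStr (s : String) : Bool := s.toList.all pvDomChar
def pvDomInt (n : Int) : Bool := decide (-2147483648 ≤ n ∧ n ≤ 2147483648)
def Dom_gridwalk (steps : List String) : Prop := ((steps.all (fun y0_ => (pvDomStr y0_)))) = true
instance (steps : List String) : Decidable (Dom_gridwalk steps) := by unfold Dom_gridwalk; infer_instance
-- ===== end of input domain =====

-- B replaces A's per-step accumulation loop by counting the six direction tokens and
-- computing the coordinates as a closed-form linear combination of the counts (alternative).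

-- ===== PORT A =====
-- step of A's loop body: the same if/elif ladder with inc
def gridwalkStepA (acc : Int × Int × Int) (s : String) : Int × Int × Int :=
  let (x, y, z) := acc
  if s = "e" ∨ s = "w" then
    let inc : Int := if s = "w" then 1 else -1
    (x - inc, y + inc, z)
  else if s = "ne" ∨ s = "sw" then
    let inc : Int := if s = "ne" then 1 else -1
    (x + inc, y, z - inc)
  else if s = "se" ∨ s = "nw" then
    let inc : Int := if s = "se" then 1 else -1
    (x, y - inc, z + inc)
  else (x, y, z)

def gridwalk (steps : List String) : Int × Int × Int :=
  steps.foldl gridwalkStepA (0, 0, 0)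

-- ===== PORT B =====
def gridwalk_alt (steps : List String) : Int × Int × Int :=
  let e : Int := PySem.List.count steps "e"
  let w : Int := PySem.List.count steps "w"
  let ne : Int := PySem.List.count steps "ne"
  let sw : Int := PySem.List.count steps "sw"
  let se : Int := PySem.List.count steps "se"
  let nw : Int := PySem.List.count steps "nw"
  (e - w + ne - sw, w - e + nw - se, sw - ne + se - nw)

-- ===== PRECONDITION & SPEC =====
def Spec_gridwalk (steps : List String) (out : Int × Int × Int) : Prop := out = gridwalk_alt steps
instance (steps : List String) (out : Int × Int × Int) : Decidable (Spec_gridwalk steps out) := by unfold Spec_gridwalk; infer_instance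

-- ===== CLAIM (what is proved, stated in full; the proofs are below) =====
def Claim_equal_gridwalk : Prop := ∀ (steps : List String), Dom_gridwalk steps → Spec_gridwalk steps (gridwalk steps)

-- ===== LEMMAS AND PROOFS =====
-- loop invariant: A's fold from an arbitrary accumulator equals the accumulator plus
-- the linear combination of the six token counts
theorem gridwalk_foldl_counts (steps : List String) (x y z : Int) :
    steps.foldl gridwalkStepA (x, y, z) =
      (x + (steps.count "e" : Int) - steps.count "w" + steps.count "ne" - steps.count "sw",
       y + (steps.count "w" : Int) - steps.count "e" + steps.count "nw" - steps.count "se",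
       z + (steps.count "sw" : Int) - steps.count "ne" + steps.count "se" - steps.count "nw") := by
  induction steps generalizing x y z with
  | nil => simp
  | cons s rest ih =>
    by_cases h1 : s = "e"
    · subst h1
      simp [List.foldl_cons, gridwalkStepA, ih, Prod.ext_iff]
      omega
    by_cases h2 : s = "w"
    · subst h2
      simp [List.foldl_cons, gridwalkStepA, ih, Prod.ext_iff]
      omega
    by_cases h3 : s = "ne"
    · subst h3
      simp [List.foldl_cons, gridwalkStepA, ih, Prod.ext_iff]
      omega
    by_cases h4 : s = "sw"
    · subst h4
      simp [List.foldl_cons, gridwalkStepA, ih, Prod.ext_iff]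
      omega
    by_cases h5 : s = "se"
    · subst h5
      simp [List.foldl_cons, gridwalkStepA, ih, Prod.ext_iff]
      omega
    by_cases h6 : s = "nw"
    · subst h6
      simp [List.foldl_cons, gridwalkStepA, ih, Prod.ext_iff]
      omega
    · simp [List.foldl_cons, gridwalkStepA, h1, h2, h3, h4, h5, h6, ih]

-- ===== VERDICT (by name: the statement is the Claim_ definition above) =====
theorem gridwalk_spec : Claim_equal_gridwalk := by
  intro steps _
  unfold Spec_gridwalk gridwalk gridwalk_alt
  rw [gridwalk_foldl_counts]
  simp [PySem.List.count]
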